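-- pv_equiv track=rewrite | github.com/ndtands/Algorithm_and_data_structer | _quy_hoach_dong.py | optimal_coin
-- ===== SOURCE A (Python) =====
-- def optimal_coin(money,coins):
--     sequence = [[]]*(money+1)
--     for m in range(money+1):
--         for i in coins:
--             if m==i:
--                 sequence[i]=[i]
--             elif m>i:
--                 temp = len(sequence[m-i])+1
--                 if sequence[m]==[]:
--                     sequence[m]=sequence[m-i]+[i]
--                 elif temp <len(sequence[m]):
--                     sequence[m]=sequence[m-i]+[i]
--     return sequence
-- ===== SOURCE B (Python) =====
-- def optimal_coin(money, coins):
--     # Instead of storing whole coin lists per amount, keep only (count,last-coin)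
--     # per amount and reconstruct each sequence by following the last pointers.
--     n = money + 1
--     count = [0] * n
--     last = [0] * n
--     for m in range(n):
--         for i in coins:
--             if m == i:
--                 count[m] = 1
--                 last[m] = i
--             elif m > i:
--                 temp = count[m - i] + 1
--                 if count[m] == 0 or temp < count[m]:
--                     count[m] = temp
--                     last[m] = i
--     result = []
--     for m in range(n):
--         seq = []
--         j = m
--         for _ in range(count[m]):
--             seq.append(last[j])
--             j -= last[j]
--         seq.reverse()
--         result.append(seq)
--     return result
-- ===== Notes on version B (the rewrite author's own statement) =====
-- stated objective: alternative
-- what changed: B replaces A's table of whole coin lists with per-amount (count, last-coin) integer cells updated by the same rules, then reconstructs each sequence by following the last-coin pointers; A's repeated list concatenations disappear.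
import Mathlib
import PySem

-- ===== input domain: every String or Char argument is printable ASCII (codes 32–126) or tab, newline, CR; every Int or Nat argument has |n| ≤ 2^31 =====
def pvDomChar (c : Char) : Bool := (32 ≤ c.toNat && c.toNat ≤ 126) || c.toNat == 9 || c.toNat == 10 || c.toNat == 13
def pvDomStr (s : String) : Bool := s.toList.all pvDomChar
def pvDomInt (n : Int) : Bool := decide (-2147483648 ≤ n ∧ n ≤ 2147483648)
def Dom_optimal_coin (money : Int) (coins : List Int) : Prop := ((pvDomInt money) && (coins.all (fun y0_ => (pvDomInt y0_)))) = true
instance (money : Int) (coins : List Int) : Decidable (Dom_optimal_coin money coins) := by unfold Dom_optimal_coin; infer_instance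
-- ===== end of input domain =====

-- B replaces A's table of whole coin lists by per-amount (count, last-coin) cells
-- and reconstructs each sequence by following the last-coin pointers (objective:
-- alternative data structure, same update rules; return value is identical).

-- ===== PORT A =====
def stepA (m : Int) (seq : List (List Int)) (i : Int) : List (List Int) :=
  if m = i then PySem.List.pySetD seq i [i]
  else if m > i then
    let temp : Int := ((PySem.List.pyGetD seq (m - i) []).length : Int) + 1
    if PySem.List.pyGetD seq m [] = ([] : List Int) then
      PySem.List.pySetD seq m (PySem.List.pyGetD seq (m - i) [] ++ [i])
    else if temp < ((PySem.List.pyGetD seq m []).length : Int) then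
      PySem.List.pySetD seq m (PySem.List.pyGetD seq (m - i) [] ++ [i])
    else seq
  else seq

def optimal_coin (money : Int) (coins : List Int) : List (List Int) :=
  (PySem.List.pyRange 0 (money + 1) 1).foldl
    (fun seq m => coins.foldl (stepA m) seq)
    (List.replicate (money + 1).toNat ([] : List Int))

-- ===== PORT B =====
def stepB (m : Int) (st : List Int × List Int) (i : Int) : List Int × List Int :=
  if m = i then (PySem.List.pySetD st.1 m 1, PySem.List.pySetD st.2 m i)
  else if m > i then
    let temp : Int := PySem.List.pyGetD st.1 (m - i) 0 + 1
    if PySem.List.pyGetD st.1 m 0 = 0 ∨ temp < PySem.List.pyGetD st.1 m 0 then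
      (PySem.List.pySetD st.1 m temp, PySem.List.pySetD st.2 m i)
    else st
  else st

-- the reconstruction loop 'for _ in range(count[m]): seq.append(last[j]); j -= last[j]';
-- the fuel is count[m] (nonnegative inside Pre_, so .toNat at the call site is exact)
def buildB (last : List Int) : Int → Nat → List Int → List Int
  | _, 0, seq => seq
  | j, f + 1, seq =>
    let c := PySem.List.pyGetD last j 0
    buildB last (j - c) f (seq ++ [c])

def optimal_coin_alt (money : Int) (coins : List Int) : List (List Int) :=
  let n := money + 1
  let st := (PySem.List.pyRange 0 n 1).foldl (fun st m => coins.foldl (stepB m) st)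
      (List.replicate n.toNat (0 : Int), List.replicate n.toNat (0 : Int))
  (PySem.List.pyRange 0 n 1).foldl
    (fun result m =>
      result ++ [(buildB st.2 m (PySem.List.pyGetD st.1 m 0).toNat []).reverse]) []

-- ===== PRECONDITION & SPEC =====
-- Pre_ excludes exactly the inputs where A raises IndexError: a negative coin with
-- money ≥ 0 makes A read sequence[m-i] past the end of the table.
def Pre_optimal_coin (money : Int) (coins : List Int) : Prop :=
  money < 0 ∨ ∀ i ∈ coins, 0 ≤ i
instance (money : Int) (coins : List Int) : Decidable (Pre_optimal_coin money coins) := by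
  unfold Pre_optimal_coin; infer_instance

def pvWitness_optimal_coin : Int × List Int := (5, [1, 2])

def Spec_optimal_coin (money : Int) (coins : List Int) (out : List (List Int)) : Prop := out = optimal_coin_alt money coins
instance (money : Int) (coins : List Int) (out : List (List Int)) : Decidable (Spec_optimal_coin money coins out) := by unfold Spec_optimal_coin; infer_instance

-- ===== CLAIM (what is proved, stated in full; the proofs are below) =====
def Claim_equal_optimal_coin : Prop := ∀ (money : Int) (coins : List Int), Dom_optimal_coin money coins → Pre_optimal_coin money coins → Spec_optimal_coin money coins (optimal_coin money coins)

-- ===== LEMMAS AND PROOFS =====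

-- abstract reconstruction (already in bottom-up order), over Nat indices
def recon (lst : List Int) : Nat → Nat → List Int
  | 0, _ => []
  | f + 1, j => recon lst f (j - (lst.getD j 0).toNat) ++ [lst.getD j 0]

-- the coupling invariant after processing amounts < b
def CInv (N b : Nat) (seq : List (List Int)) (cnt lst : List Int) : Prop :=
  seq.length = N ∧ cnt.length = N ∧ lst.length = N ∧
  ∀ j, j < N →
    (b ≤ j → seq.getD j [] = []) ∧
    cnt.getD j 0 = ((seq.getD j []).length : Int) ∧
    0 ≤ lst.getD j 0 ∧ lst.getD j 0 ≤ (j : Int) ∧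
    recon lst (cnt.getD j 0).toNat j = seq.getD j []

theorem getD_set_self {α : Type} [Inhabited α] (l : List α) (m : Nat) (v d : α)
    (h : m < l.length) : (l.set m v).getD m d = v := by
  simp [List.getD, List.getElem?_set_self h]

theorem getD_set_ne {α : Type} [Inhabited α] (l : List α) (m j : Nat) (v d : α)
    (h : j ≠ m) : (l.set m v).getD j d = l.getD j d := by
  simp [List.getD, List.getElem?_set_ne (Ne.symm h)]

theorem recon_congr (lst lst' : List Int) (f : Nat) :
    ∀ j, (∀ j', j' ≤ j → lst'.getD j' 0 = lst.getD j' 0) →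
    recon lst' f j = recon lst f j := by
  induction f with
  | zero => intro j _; rfl
  | succ f ih =>
    intro j h
    simp only [recon, h j le_rfl]
    rw [ih _ (fun j' hj' => h j' (le_trans hj' (Nat.sub_le _ _)))]

theorem recon_set_gt (lst : List Int) (m j : Nat) (v : Int) (f : Nat) (h : j < m) :
    recon (lst.set m v) f j = recon lst f j := by
  apply recon_congr
  intro j' hj'
  exact getD_set_ne _ _ _ _ _ (by omega)

theorem CInv_mono (N b b' : Nat) (seq : List (List Int)) (cnt lst : List Int)
    (hb : b ≤ b') (h : CInv N b seq cnt lst) : CInv N b' seq cnt lst := by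
  obtain ⟨h1, h2, h3, h4⟩ := h
  refine ⟨h1, h2, h3, fun j hj => ?_⟩
  obtain ⟨e, c, l1, l2, r⟩ := h4 j hj
  exact ⟨fun hbj => e (le_trans hb hbj), c, l1, l2, r⟩

theorem CInv_set (N mN : Nat) (hm : mN < N)
    (seq : List (List Int)) (cnt lst : List Int)
    (h : CInv N (mN + 1) seq cnt lst)
    (entry : List Int) (c l : Int)
    (hc : c = (entry.length : Int))
    (hl0 : 0 ≤ l) (hl1 : l ≤ (mN : Int))
    (hr : recon (lst.set mN l) c.toNat mN = entry) :
    CInv N (mN + 1) (seq.set mN entry) (cnt.set mN c) (lst.set mN l) := by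
  obtain ⟨h1, h2, h3, h4⟩ := h
  refine ⟨by simpa using h1, by simpa using h2, by simpa using h3, fun j hj => ?_⟩
  by_cases hjm : j = mN
  · subst hjm
    rw [getD_set_self _ _ _ _ (by omega), getD_set_self _ _ _ _ (by omega),
        getD_set_self _ _ _ _ (by omega)]
    exact ⟨fun hb => absurd hb (by omega), hc, hl0, hl1, hr⟩
  · rw [getD_set_ne _ _ _ _ _ hjm, getD_set_ne _ _ _ _ _ hjm, getD_set_ne _ _ _ _ _ hjm]
    obtain ⟨e, hcnt, hL0, hL1, hrec⟩ := h4 j hj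
    refine ⟨e, hcnt, hL0, hL1, ?_⟩
    by_cases hlt : j < mN
    · rw [recon_set_gt _ _ _ _ _ hlt]; exact hrec
    · have hgt : mN + 1 ≤ j := by omega
      have he : seq.getD j [] = [] := e hgt
      have : cnt.getD j 0 = 0 := by rw [hcnt, he]; simp
      rw [this, he]
      rfl

theorem step_both (N mN : Nat) (hm : mN < N) (i : Int) (hi : 0 ≤ i)
    (seq : List (List Int)) (cnt lst : List Int)
    (h : CInv N (mN + 1) seq cnt lst) :
    CInv N (mN + 1) (stepA (mN : Int) seq i)
      (stepB (mN : Int) (cnt, lst) i).1 (stepB (mN : Int) (cnt, lst) i).2 := by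
  obtain ⟨h1, h2, h3, h4⟩ := h
  by_cases him : (mN : Int) = i
  · -- m == i : unconditional single-coin override
    simp only [stepA, stepB, if_pos him]
    rw [← him]
    simp only [PySem.List.pySetD_natCast]
    refine CInv_set N mN hm seq cnt lst ⟨h1, h2, h3, h4⟩ [(mN : Int)] 1 (mN : Int)
      (by simp) (by positivity) le_rfl ?_
    have : ((1 : Int)).toNat = 1 := rfl
    rw [this]
    show recon (lst.set mN (mN : Int)) 0 _ ++ [(lst.set mN (mN : Int)).getD mN 0] = _
    rw [getD_set_self _ _ _ _ (by omega)]
    rfl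
  · by_cases hgt : (mN : Int) > i
    · -- m > i
      set iN : Nat := i.toNat with hiN
      have hii : (iN : Int) = i := Int.toNat_of_nonneg hi
      have hiNm : iN < mN := by omega
      have hsub : (mN : Int) - i = ((mN - iN : Nat) : Int) := by omega
      have hprevlt : mN - iN < N := by omega
      obtain ⟨_, hcntm, _, _, _⟩ := h4 mN hm
      obtain ⟨_, hcntp, _, _, hrecp⟩ := h4 (mN - iN) hprevlt
      simp only [stepA, stepB, if_neg him, if_pos hgt, hsub,
        PySem.List.pyGetD_natCast, PySem.List.pySetD_natCast]
      set prev := seq.getD (mN - iN) [] with hprev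
      set cur := seq.getD mN [] with hcur
      -- the two programs take the same branch
      by_cases hassign : cur = [] ∨ ((prev.length : Int) + 1 < (cur.length : Int))
      · -- assignment happens in both
        have hA : (if cur = [] then seq.set mN (prev ++ [i])
            else if (prev.length : Int) + 1 < (cur.length : Int) then seq.set mN (prev ++ [i])
            else seq) = seq.set mN (prev ++ [i]) := by
          rcases hassign with hc0 | hlt
          · rw [if_pos hc0]
          · by_cases hc0 : cur = []
            · rw [if_pos hc0]
            · rw [if_neg hc0, if_pos hlt]
        have hB : (cnt.getD mN 0 = 0 ∨ cnt.getD (mN - iN) 0 + 1 < cnt.getD mN 0) := by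
          rw [hcntm, hcntp]
          rcases hassign with hc0 | hlt
          · left; rw [hc0]; simp
          · right; exact_mod_cast hlt
        rw [hA, if_pos hB, hcntp]
        refine CInv_set N mN hm seq cnt lst ⟨h1, h2, h3, h4⟩ (prev ++ [i])
          ((prev.length : Int) + 1) i (by simp) hi (by omega) ?_
        have hfuel : ((prev.length : Int) + 1).toNat = prev.length + 1 := by omega
        rw [hfuel]
        show recon (lst.set mN i) prev.length (mN - ((lst.set mN i).getD mN 0).toNat) ++
            [(lst.set mN i).getD mN 0] = prev ++ [i]
        rw [getD_set_self _ _ _ _ (by omega), ← hiN]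
        by_cases hz : iN = 0
        · -- coin 0: assignment only fires on an empty cell
          have hcur0 : cur = [] := by
            rcases hassign with hc0 | hlt
            · exact hc0
            · exfalso
              have : prev = cur := by rw [hprev, hcur, hz]; simp
              rw [this] at hlt; omega
          have hprev0 : prev = [] := by
            rw [hprev, hz]; simpa using hcur0
          rw [hprev0]
          rfl
        · have hlt' : mN - iN < mN := by omega
          have : recon (lst.set mN i) prev.length (mN - iN) = prev := by
            rw [recon_set_gt _ _ _ _ _ hlt']
            have : (cnt.getD (mN - iN) 0).toNat = prev.length := by
              rw [hcntp]; omega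
            rw [← this, hrecp]
          rw [this]
      · -- no assignment in either program
        push Not at hassign
        obtain ⟨hc0, hlt⟩ := hassign
        have hB : ¬ (cnt.getD mN 0 = 0 ∨ cnt.getD (mN - iN) 0 + 1 < cnt.getD mN 0) := by
          rw [hcntm, hcntp]
          push Not
          constructor
          · intro hz
            exact absurd (by simpa using hz : cur = []) hc0
          · omega
        rw [if_neg hc0, if_neg (by omega), if_neg hB]
        exact ⟨h1, h2, h3, h4⟩
    · simp only [stepA, stepB, if_neg him, if_neg hgt]
      exact ⟨h1, h2, h3, h4⟩

theorem fold_both (N mN : Nat) (hm : mN < N) (coins : List Int)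
    (hc : ∀ i ∈ coins, 0 ≤ i) :
    ∀ (seq : List (List Int)) (cnt lst : List Int),
    CInv N (mN + 1) seq cnt lst →
    CInv N (mN + 1) (coins.foldl (stepA (mN : Int)) seq)
      ((coins.foldl (stepB (mN : Int)) (cnt, lst)).1)
      ((coins.foldl (stepB (mN : Int)) (cnt, lst)).2) := by
  induction coins with
  | nil => intro seq cnt lst h; exact h
  | cons c cs ih =>
    intro seq cnt lst h
    simp only [List.foldl_cons]
    have h' := step_both N mN hm c (hc c (by simp)) seq cnt lst h
    have := ih (fun i hi => hc i (by simp [hi])) _ _ _ h'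
    simpa using this

theorem getD_default_of_le {α : Type} [Inhabited α] (l : List α) (j : Nat) (d : α)
    (h : l.length ≤ j) : l.getD j d = d := by
  simp [List.getD, List.getElem?_eq_none h]

theorem buildB_recon (lst : List Int)
    (hl : ∀ k : Nat, 0 ≤ lst.getD k 0 ∧ lst.getD k 0 ≤ (k : Int)) :
    ∀ (f : Nat) (j : Nat) (acc : List Int),
    buildB lst (j : Int) f acc = acc ++ (recon lst f j).reverse := by
  intro f
  induction f with
  | zero => intro j acc; simp [buildB, recon]
  | succ f ih =>
    intro j acc
    obtain ⟨h0, h1⟩ := hl j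
    have hc : ((j : Int) - lst.getD j 0) = ((j - (lst.getD j 0).toNat : Nat) : Int) := by
      omega
    simp only [buildB, PySem.List.pyGetD_natCast, hc, ih, recon]
    simp [List.append_assoc]

-- A's table / B's (count, last) tables after processing amounts 0..k-1
def tabA (coins : List Int) (N k : Nat) : List (List Int) :=
  (List.range k).foldl (fun s (mN : Nat) => coins.foldl (stepA (mN : Int)) s)
    (List.replicate N ([] : List Int))

def tabB (coins : List Int) (N k : Nat) : List Int × List Int :=
  (List.range k).foldl (fun st (mN : Nat) => coins.foldl (stepB (mN : Int)) st)
    (List.replicate N (0 : Int), List.replicate N (0 : Int))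

theorem outer_inv (coins : List Int) (hc : ∀ i ∈ coins, 0 ≤ i) (N : Nat) :
    ∀ k, k ≤ N → CInv N k (tabA coins N k) (tabB coins N k).1 (tabB coins N k).2 := by
  intro k
  induction k with
  | zero =>
    intro _
    refine ⟨by simp [tabA], by simp [tabB], by simp [tabB], fun j hj => ?_⟩
    have ha : (tabA coins N 0).getD j [] = [] := by
      simp [tabA, List.getD, hj]
    have hb : (tabB coins N 0).1.getD j 0 = 0 := by
      simp [tabB, List.getD, hj]
    have hb2 : (tabB coins N 0).2.getD j 0 = 0 := by
      simp [tabB, List.getD, hj]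
    rw [ha, hb, hb2]
    exact ⟨fun _ => rfl, by simp, le_rfl, by positivity, rfl⟩
  | succ k ih =>
    intro hk
    have hkN : k < N := by omega
    have ihk := CInv_mono N k (k + 1) _ _ _ (Nat.le_succ k) (ih (by omega))
    have step := fold_both N k hkN coins hc _ _ _ ihk
    have ea : tabA coins N (k + 1) = coins.foldl (stepA (k : Int)) (tabA coins N k) := by
      simp [tabA, List.range_succ]
    have eb : tabB coins N (k + 1) = coins.foldl (stepB (k : Int)) (tabB coins N k) := by
      simp [tabB, List.range_succ]
    rw [ea, eb]
    exact step

theorem map_getD_self (l : List (List Int)) (N : Nat) (h : l.length = N) :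
    (List.range N).map (fun k => l.getD k []) = l := by
  apply List.ext_getElem (by simp [h])
  intro n h1 h2
  simp only [List.getElem_map, List.getElem_range]
  rw [List.getD_eq_getElem l [] h2]

theorem main_equiv (money : Int) (coins : List Int)
    (hc : ∀ i ∈ coins, 0 ≤ i) :
    optimal_coin money coins = optimal_coin_alt money coins := by
  have hrange : PySem.List.pyRange 0 (money + 1) 1
      = (List.range (money + 1).toNat).map (fun k : Nat => (k : Int)) := by
    rw [PySem.List.pyRange_one]
    norm_num
  set N := (money + 1).toNat with hN
  obtain ⟨hlen1, hlen2, hlen3, hprop⟩ := outer_inv coins hc N N le_rfl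
  have hl : ∀ k : Nat, 0 ≤ (tabB coins N N).2.getD k 0 ∧
      (tabB coins N N).2.getD k 0 ≤ (k : Int) := by
    intro k
    by_cases hk : k < N
    · obtain ⟨_, _, a, b, _⟩ := hprop k hk
      exact ⟨a, b⟩
    · rw [getD_default_of_le _ _ _ (by omega)]
      exact ⟨le_rfl, by positivity⟩
  have hA : optimal_coin money coins = tabA coins N N := by
    rw [optimal_coin, hrange, List.foldl_map, ← hN]
    rfl
  have hB : optimal_coin_alt money coins
      = (List.range N).map
          (fun (k : Nat) => (buildB (tabB coins N N).2 (k : Int)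
            (PySem.List.pyGetD (tabB coins N N).1 (k : Int) 0).toNat []).reverse) := by
    rw [optimal_coin_alt]
    simp only [hrange, List.foldl_map, ← hN]
    rw [PySem.List.foldl_append_singleton_eq_map]
    rfl
  rw [hA, hB, ← map_getD_self (tabA coins N N) N hlen1]
  apply List.map_congr_left
  intro k hk
  have hkN : k < N := List.mem_range.mp hk
  obtain ⟨_, hcnt, _, _, hrec⟩ := hprop k hkN
  rw [PySem.List.pyGetD_natCast, buildB_recon _ hl, List.nil_append,
    List.reverse_reverse, hrec]

theorem neg_equiv (money : Int) (coins : List Int) (hneg : money < 0) :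
    optimal_coin money coins = optimal_coin_alt money coins := by
  have h0 : (money + 1).toNat = 0 := by omega
  simp [optimal_coin, optimal_coin_alt, PySem.List.pyRange_one, h0]

-- ===== VERDICT (by name: the statement is the Claim_ definition above) =====
theorem optimal_coin_spec : Claim_equal_optimal_coin := by
  intro money coins _ hpre
  unfold Spec_optimal_coin
  rcases hpre with h | h
  · exact neg_equiv money coins h
  · exact main_equiv money coins h
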